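-- pv_equiv track=rewrite | github.com/AK-amitkumar/ATRIVIA | general_template/models/amount_to_text_de.py | duch_number
-- ===== SOURCE A (Python) =====
-- to_19_de = ('Null', 'Eins', 'Zwei',  'Drei', 'Vier',   u'Fünf',   'Sechs',
--           'Sieben', 'Acht', 'Neun', 'Zehn',   'Elf', u'Zwölf', 'Dreizehn',
--           'Vierzehn', u'Fünfzehn', 'Sechzehn', 'Siebzehn', 'Achtzehn', 'Neunzehn' )
--
-- tens_de = ( 'Zwanzig', u'Dreiβig', 'Vierzig', u'Fünfzig', 'Sechzig', 'Siebzig', 'Achtzig', 'Neunzig')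
--
-- denom_de = ('',
--           'Tausend',     'Million',         'Milliarde',       'Billion',       'Quadrillion',
--           'Trillion',  'Sextillion',      'Septillion',    'Octillion',      'Nonillion',
--           'Decillion',    'Undecillion',     'Duodecillion',  'Tredecillion',   'Quattuordecillion',
--           'Sexdecillion', 'Septendecillion', 'Octodecillion', 'Novemdecillion', 'Vigintillion' )
--
-- def _convert_nn_de(val):
--     """ convert a value < 100 to French
--     """
--     if val < 20:
--         return to_19_de[val]
--     for (dcap, dval) in ((k, 20 + (10 * v)) for (v, k) in enumerate(tens_de)):
--         if dval + 10 > val: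
--             if val % 10:
--                 if dval == 70 or dval == 90:
--                     return tens_de[dval / 10 - 3] + '-' + to_19_de[val % 10 + 10]
--                 else:
--                     return dcap + '-' + to_19_de[val % 10]
--             return dcap
--
-- def _convert_nnn_de(val):
--     """ convert a value < 1000 to french
--
--         special cased because it is the level that kicks
--         off the < 100 special case.  The rest are more general.  This also allows you to
--         get strings in the form of 'forty-five hundred' if called directly.
--     """
--     word = ''
--     (mod, rem) = (val % 100, val // 100)
--     if rem > 0:
--         if rem == 1:
--             word = 'Eins Hundert'
--         else:
--             word = to_19_de[rem] + ' Hundert'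
--         if mod > 0:
--             word += ' '
--     if mod > 0:
--         word += _convert_nn_de(mod)
--     return word
--
-- def duch_number(val):
--     if val < 100:
--         return _convert_nn_de(val)
--     if val < 1000:
--         return _convert_nnn_de(val)
--     for (didx, dval) in ((v - 1, 1000 ** v) for v in range(len(denom_de))):
--         if dval > val:
--             mod = 1000 ** didx
--             l = val // mod
--             r = val - (l * mod)
--             if l == 1:
--                 ret = 'Eins' + denom_de[didx]
--             else:
--                 ret = _convert_nnn_de(l) + ' ' + denom_de[didx]
--             if r > 0:
--                 ret = ret + ', ' + duch_number(r)
--             return ret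
-- ===== SOURCE B (Python) =====
-- to_19_de = ('Null', 'Eins', 'Zwei',  'Drei', 'Vier',   u'Fünf',   'Sechs',
--           'Sieben', 'Acht', 'Neun', 'Zehn',   'Elf', u'Zwölf', 'Dreizehn',
--           'Vierzehn', u'Fünfzehn', 'Sechzehn', 'Siebzehn', 'Achtzehn', 'Neunzehn' )
--
-- tens_de = ( 'Zwanzig', u'Dreiβig', 'Vierzig', u'Fünfzig', 'Sechzig', 'Siebzig', 'Achtzig', 'Neunzig')
--
-- denom_de = ('',
--           'Tausend',     'Million',         'Milliarde',       'Billion',       'Quadrillion',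
--           'Trillion',  'Sextillion',      'Septillion',    'Octillion',      'Nonillion',
--           'Decillion',    'Undecillion',     'Duodecillion',  'Tredecillion',   'Quattuordecillion',
--           'Sexdecillion', 'Septendecillion', 'Octodecillion', 'Novemdecillion', 'Vigintillion' )
--
-- def _nn(val):
--     # value below 100: table word below 20, else tens word with optional '-' units
--     if val < 20:
--         return to_19_de[val]
--     t, o = divmod(val, 10)
--     word = tens_de[t - 2]
--     if o:
--         word += '-' + to_19_de[o]
--     return word
--
-- def _nnn(val):
--     # value below 1000: optional hundreds part, then the below-100 part
--     mod, rem = val % 100, val // 100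
--     word = ''
--     if rem > 0:
--         word = ('Eins Hundert' if rem == 1 else to_19_de[rem] + ' Hundert')
--         if mod > 0:
--             word += ' '
--     if mod > 0:
--         word += _nn(mod)
--     return word
--
-- def duch_number(val):
--     if val < 100:
--         return _nn(val)
--     if val < 1000:
--         return _nnn(val)
--     # peel val into base-1000 groups (low to high), then emit the nonzero
--     # groups from the highest down, joined with ', '
--     groups = []
--     v = val
--     while v > 0:
--         v, g = divmod(v, 1000)
--         groups.append(g)
--     chunks = []
--     for i in reversed(range(len(groups))):
--         g = groups[i]
--         if g == 0:
--             continue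
--         if i == 0:
--             chunks.append(_nnn(g))
--         elif g == 1:
--             chunks.append('Eins' + denom_de[i])
--         else:
--             chunks.append(_nnn(g) + ' ' + denom_de[i])
--     return ', '.join(chunks)
-- ===== Notes on version B (the rewrite author's own statement) =====
-- stated objective: alternative
-- what changed: duch_number's recursive descent with a magnitude-search loop per call is replaced by one iterative base-1000 decomposition (repeated divmod) followed by a single high-to-low pass that joins nonzero group chunks with ', '; the sub-100 helper is a direct divmod formula instead of a linear scan over the tens table.
-- outside the precondition, e.g. on duch_number(71): A raises TypeError, B returns 'Siebzig-Eins'; on duch_number(91): A raises TypeError, B returns 'Neunzig-Eins'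
import Mathlib
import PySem

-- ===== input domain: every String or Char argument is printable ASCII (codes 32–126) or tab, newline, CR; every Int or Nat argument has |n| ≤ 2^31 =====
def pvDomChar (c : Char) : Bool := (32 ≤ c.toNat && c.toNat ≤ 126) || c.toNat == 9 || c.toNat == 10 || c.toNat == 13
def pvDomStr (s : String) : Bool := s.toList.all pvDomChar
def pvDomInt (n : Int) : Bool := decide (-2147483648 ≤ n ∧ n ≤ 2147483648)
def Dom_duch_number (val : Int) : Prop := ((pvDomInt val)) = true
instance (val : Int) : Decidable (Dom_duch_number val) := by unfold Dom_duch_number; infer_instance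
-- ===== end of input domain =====

-- B replaces A's recursive descent (with a magnitude-search loop per call) by one base-1000
-- decomposition plus a single high-to-low pass joined with ', ' (objective: alternative algorithm,
-- same cost on the bounded domain). Where A raises TypeError (groups ending 71-79/91-99, a
-- float-index leftover), B returns the regular tens word; those inputs are outside Pre_.

-- shared module-level tables (module constants in both Python files)
def to19 : List String := ["Null", "Eins", "Zwei", "Drei", "Vier", "Fünf", "Sechs",
  "Sieben", "Acht", "Neun", "Zehn", "Elf", "Zwölf", "Dreizehn",
  "Vierzehn", "Fünfzehn", "Sechzehn", "Siebzehn", "Achtzehn", "Neunzehn"]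

def tensDe : List String := ["Zwanzig", "Dreiβig", "Vierzig", "Fünfzig", "Sechzig", "Siebzig", "Achtzig", "Neunzig"]

def denomDe : List String := ["", "Tausend", "Million", "Milliarde", "Billion", "Quadrillion",
  "Trillion", "Sextillion", "Septillion", "Octillion", "Nonillion",
  "Decillion", "Undecillion", "Duodecillion", "Tredecillion", "Quattuordecillion",
  "Sexdecillion", "Septendecillion", "Octodecillion", "Novemdecillion", "Vigintillion"]

-- ===== PORT A =====

-- _convert_nn_de's for-loop over enumerate(tens_de); v is the enumerate index
def nnLoopA (val : Int) (v : Nat) : List String → String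
  | [] => ""            -- Python falls through (returns None); unreachable: nnA is called with val < 100
  | dcap :: rest =>
    let dval : Int := 20 + 10 * v
    if dval + 10 > val then
      if PySem.Int.mod val 10 ≠ 0 then
        if dval = 70 ∨ dval = 90 then ""   -- Python raises TypeError here (float index); excluded by Pre_
        else dcap ++ "-" ++ (PySem.List.pyGet? to19 (PySem.Int.mod val 10)).getD ""
      else dcap
    else nnLoopA val (v + 1) rest

def nnA (val : Int) : String :=
  -- to_19_de[val]: IndexError (val < -20) is excluded by Pre_, so .getD "" is never taken there
  if val < 20 then (PySem.List.pyGet? to19 val).getD ""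
  else nnLoopA val 0 tensDe

def nnnA (val : Int) : String :=
  let mo := PySem.Int.mod val 100
  let rem := PySem.Int.floordiv val 100
  let word :=
    if rem > 0 then
      (if rem = 1 then "Eins Hundert" else (PySem.List.pyGet? to19 rem).getD "" ++ " Hundert")
        ++ (if mo > 0 then " " else "")
    else ""
  if mo > 0 then word ++ nnA mo else word

-- the for-loop '(didx, dval) = (v-1, 1000**v) for v in range(len(denom_de))'; recur is the recursive call
def loopA (recur : Int → String) (val : Int) (v : Nat) : String :=
  if v < 21 then
    if (1000 : Int) ^ v > val then
      let didx := v - 1      -- v ≥ 2 whenever this branch is reached from duchA (val ≥ 1000)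
      let md : Int := (1000 : Int) ^ didx
      let l := PySem.Int.floordiv val md
      let r := val - l * md
      let ret := if l = 1 then "Eins" ++ (PySem.List.pyGet? denomDe (didx : Int)).getD ""
                 else nnnA l ++ " " ++ (PySem.List.pyGet? denomDe (didx : Int)).getD ""
      if r > 0 then ret ++ ", " ++ recur r else ret
    else loopA recur val (v + 1)
  else ""                    -- loop falls through: Python returns None (val ≥ 1000^20, outside Dom)
termination_by 21 - v

-- fuel = val.toNat + 1 suffices: the recursive call strictly decreases a positive val
def duchA : Nat → Int → String
  | 0, _ => ""
  | f + 1, val =>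
    if val < 100 then nnA val
    else if val < 1000 then nnnA val
    else loopA (duchA f) val 0

def duch_number (val : Int) : String := duchA (val.toNat + 1) val

-- ===== PORT B =====

def nnB (val : Int) : String :=
  if val < 20 then (PySem.List.pyGet? to19 val).getD ""
  else
    let t := PySem.Int.floordiv val 10
    let o := PySem.Int.mod val 10
    let word := (PySem.List.pyGet? tensDe (t - 2)).getD ""
    if o ≠ 0 then word ++ "-" ++ (PySem.List.pyGet? to19 o).getD "" else word

def nnnB (val : Int) : String :=
  let mo := PySem.Int.mod val 100
  let rem := PySem.Int.floordiv val 100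
  let word :=
    if rem > 0 then
      (if rem = 1 then "Eins Hundert" else (PySem.List.pyGet? to19 rem).getD "" ++ " Hundert")
        ++ (if mo > 0 then " " else "")
    else ""
  if mo > 0 then word ++ nnB mo else word

-- the 'while v > 0: v, g = divmod(v, 1000); groups.append(g)' loop (low group first)
def groupsB (v : Int) : List Int :=
  if h : 0 < v then PySem.Int.mod v 1000 :: groupsB (PySem.Int.floordiv v 1000) else []
termination_by v.toNat
decreasing_by
  rw [PySem.Int.floordiv_eq_ediv_of_pos (by omega : (0:Int) < 1000)]
  omega

def chunkB (i : Nat) (g : Int) : String :=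
  if i = 0 then nnnB g
  else if g = 1 then "Eins" ++ (PySem.List.pyGet? denomDe (i : Int)).getD ""
  else nnnB g ++ " " ++ (PySem.List.pyGet? denomDe (i : Int)).getD ""

def duch_number_alt (val : Int) : String :=
  if val < 100 then nnB val
  else if val < 1000 then nnnB val
  else
    let gs := groupsB val
    let chunks := (List.range gs.length).reverse.foldl
      (fun acc i => if gs.getD i 0 = 0 then acc else acc ++ [chunkB i (gs.getD i 0)]) []
    PySem.Str.join ", " chunks

-- ===== PRECONDITION & SPEC =====

-- the two-digit patterns on which A's dead French branch raises TypeError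
def badNN (m : Int) : Bool := (71 ≤ m && m ≤ 79) || (91 ≤ m && m ≤ 99)

-- base-1000 group i of val
def grp (val : Int) (i : Nat) : Int :=
  PySem.Int.mod (PySem.Int.floordiv val ((1000 : Int) ^ i)) 1000

-- Pre_ excludes exactly the inputs where A raises: val < -20 (IndexError from to_19_de[val]) and
-- nonnegative val with some base-1000 group ending in 71-79 or 91-99 (TypeError from a float index).
def Pre_duch_number (val : Int) : Prop :=
  -20 ≤ val ∧ (0 ≤ val → ∀ i ∈ ([0, 1, 2, 3] : List Nat), badNN (PySem.Int.mod (grp val i) 100) = false)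
instance (val : Int) : Decidable (Pre_duch_number val) := by unfold Pre_duch_number; infer_instance

def pvWitness_duch_number : Int := 123456

def Spec_duch_number (val : Int) (out : String) : Prop := out = duch_number_alt val
instance (val : Int) (out : String) : Decidable (Spec_duch_number val out) := by unfold Spec_duch_number; infer_instance

-- ===== CLAIM (what is proved, stated in full; the proofs are below) =====
def Claim_equal_duch_number : Prop := ∀ (val : Int), Dom_duch_number val → Pre_duch_number val → Spec_duch_number val (duch_number val)

-- ===== LEMMAS AND PROOFS =====

theorem pow1000_pos (i : Nat) : (0 : Int) < 1000 ^ i := by positivity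

theorem grp_eq (val : Int) (i : Nat) : grp val i = val / 1000 ^ i % 1000 := by
  unfold grp
  rw [PySem.Int.floordiv_eq_ediv_of_pos (pow1000_pos i),
    PySem.Int.mod_eq_emod_of_pos (by omega : (0:Int) < 1000)]

theorem grp_zero (i : Nat) : grp 0 i = 0 := by
  rw [grp_eq]; simp

theorem grp_shift (val : Int) (i : Nat) :
    grp (PySem.Int.floordiv val 1000) i = grp val (i + 1) := by
  rw [grp_eq, grp_eq, PySem.Int.floordiv_eq_ediv_of_pos (by omega : (0:Int) < 1000)]
  rw [Int.ediv_ediv_of_nonneg (by omega : (0:Int) ≤ 1000), ← pow_succ']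

theorem grp_small (r : Int) (i : Nat) (h0 : 0 ≤ r) (h : r < 1000 ^ i) : grp r i = 0 := by
  rw [grp_eq, Int.ediv_eq_zero_of_lt h0 h]; simp

theorem grp_zero_eq_self (val : Int) (h0 : 0 ≤ val) (h : val < 1000) : grp val 0 = val := by
  rw [grp_eq]; norm_num; omega

-- groups of val % 1000^k agree with groups of val below index k
theorem grp_mod (val : Int) (k i : Nat) (hik : i < k) :
    grp (val % 1000 ^ k) i = grp val i := by
  rw [grp_eq, grp_eq]
  have hpow : (1000:Int) ^ k = (1000 ^ (k - i - 1) * 1000) * 1000 ^ i := by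
    rw [mul_assoc, ← pow_succ', ← pow_add]
    congr 1
    omega
  have hval : val = val % 1000 ^ k + (val / 1000 ^ k * (1000 ^ (k - i - 1) * 1000)) * 1000 ^ i := by
    calc val = 1000 ^ k * (val / 1000 ^ k) + val % 1000 ^ k :=
          (Int.mul_ediv_add_emod val (1000 ^ k)).symm
      _ = _ := by rw [hpow]; ring
  conv_rhs => rw [hval]
  rw [Int.add_mul_ediv_right _ _ (ne_of_gt (pow1000_pos i))]
  rw [show val / 1000 ^ k * (1000 ^ (k - i - 1) * 1000) =
        val / 1000 ^ k * 1000 ^ (k - i - 1) * 1000 from by ring]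
  generalize val % 1000 ^ k / 1000 ^ i = X
  generalize val / 1000 ^ k * 1000 ^ (k - i - 1) = Q
  omega

theorem groupsB_getD (val : Int) (h : 0 ≤ val) (i : Nat) :
    (groupsB val).getD i 0 = grp val i := by
  rw [groupsB]
  by_cases hv : 0 < val
  · rw [dif_pos hv]
    cases i with
    | zero =>
      show PySem.Int.mod val 1000 = grp val 0
      rw [grp_eq, PySem.Int.mod_eq_emod_of_pos (by omega : (0:Int) < 1000)]
      norm_num
    | succ j =>
      show (groupsB (PySem.Int.floordiv val 1000)).getD j 0 = grp val (j + 1)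
      rw [groupsB_getD (PySem.Int.floordiv val 1000)
        (by rw [PySem.Int.floordiv_eq_ediv_of_pos (by omega : (0:Int) < 1000)]; positivity) j,
        grp_shift]
  · rw [dif_neg hv]
    have hz : val = 0 := by omega
    subst hz
    simp [grp_zero]
termination_by val.toNat
decreasing_by
  rw [PySem.Int.floordiv_eq_ediv_of_pos (by omega : (0:Int) < 1000)]
  omega

theorem groupsB_len_le (k : Nat) : ∀ val : Int, val < 1000 ^ k → (groupsB val).length ≤ k := by
  induction k with
  | zero =>
    intro val h
    norm_num at h
    rw [groupsB, dif_neg (by omega : ¬ (0:Int) < val)]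
    simp
  | succ j ih =>
    intro val h
    rw [groupsB]
    by_cases hv : 0 < val
    · rw [dif_pos hv]
      simp only [List.length_cons]
      have hq : PySem.Int.floordiv val 1000 < 1000 ^ j := by
        rw [PySem.Int.floordiv_eq_ediv_of_pos (by omega : (0:Int) < 1000)]
        rw [Int.ediv_lt_iff_lt_mul (by omega : (0:Int) < 1000)]
        rw [← pow_succ]
        exact h
      exact Nat.succ_le_succ (ih _ hq)
    · rw [dif_neg hv]; simp

theorem groupsB_len_gt (k : Nat) : ∀ val : Int, 1000 ^ k ≤ val → k < (groupsB val).length := by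
  induction k with
  | zero =>
    intro val h
    norm_num at h
    rw [groupsB, dif_pos (by omega : (0:Int) < val)]
    simp
  | succ j ih =>
    intro val h
    have hv : (0:Int) < val := lt_of_lt_of_le (pow1000_pos (j + 1)) h
    rw [groupsB, dif_pos hv]
    simp only [List.length_cons]
    have hq : 1000 ^ j ≤ PySem.Int.floordiv val 1000 := by
      rw [PySem.Int.floordiv_eq_ediv_of_pos (by omega : (0:Int) < 1000)]
      rw [Int.le_ediv_iff_mul_le (by omega : (0:Int) < 1000)]
      rw [← pow_succ]
      exact h
    exact Nat.succ_lt_succ (ih _ hq)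

-- proof-side view of B's high-to-low pass: the nonzero chunks of groups k, …, 0 of val
def chunksF (val : Int) : Nat → List String
  | 0 => if grp val 0 = 0 then [] else [chunkB 0 (grp val 0)]
  | k + 1 => (if grp val (k + 1) = 0 then [] else [chunkB (k + 1) (grp val (k + 1))]) ++ chunksF val k

theorem chunksF_zero_step (val : Int) :
    chunksF val 0 = if grp val 0 = 0 then [] else [chunkB 0 (grp val 0)] := rfl

theorem chunksF_succ_step (val : Int) (k : Nat) :
    chunksF val (k + 1) =
      (if grp val (k + 1) = 0 then [] else [chunkB (k + 1) (grp val (k + 1))]) ++ chunksF val k := rfl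

theorem chunksF_congr (a b : Int) (k : Nat) (h : ∀ i, i ≤ k → grp a i = grp b i) :
    chunksF a k = chunksF b k := by
  induction k with
  | zero => unfold chunksF; rw [h 0 (le_refl 0)]
  | succ j ih =>
    unfold chunksF
    rw [h (j + 1) (le_refl _), ih (fun i hi => h i (by omega))]

theorem chunksF_zero (k : Nat) : chunksF 0 k = [] := by
  induction k with
  | zero => unfold chunksF; rw [grp_zero, if_pos rfl]
  | succ j ih => unfold chunksF; rw [grp_zero, if_pos rfl, List.nil_append, ih]

theorem chunksF_eq_nil (r : Int) (k : Nat) (h : chunksF r k = []) : ∀ i, i ≤ k → grp r i = 0 := by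
  induction k with
  | zero =>
    intro i hi
    interval_cases i
    unfold chunksF at h
    by_contra hne
    rw [if_neg hne] at h
    simp at h
  | succ j ih =>
    unfold chunksF at h
    rw [List.append_eq_nil_iff] at h
    intro i hi
    by_cases hij : i ≤ j
    · exact ih h.2 i hij
    · have hj : i = j + 1 := by omega
      subst hj
      by_contra hne
      rw [if_neg hne] at h
      simp at h

theorem eq_zero_of_grps (k : Nat) : ∀ r : Int, 0 ≤ r → r < 1000 ^ (k + 1) →
    (∀ i, i ≤ k → grp r i = 0) → r = 0 := by
  induction k with
  | zero =>
    intro r h0 h1 h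
    have hg := h 0 (le_refl 0)
    rw [grp_eq] at hg
    norm_num at hg h1
    omega
  | succ j ih =>
    intro r h0 h1 h
    have h00 := h 0 (by omega)
    rw [grp_eq] at h00
    norm_num at h00
    have hq0 : (0:Int) ≤ r / 1000 := Int.ediv_nonneg h0 (by omega)
    have hq1 : r / 1000 < 1000 ^ (j + 1) := by
      rw [Int.ediv_lt_iff_lt_mul (by omega : (0:Int) < 1000), ← pow_succ]
      exact h1
    have hq := ih (r / 1000) hq0 hq1 (fun i hi => by
      rw [← PySem.Int.floordiv_eq_ediv_of_pos (by omega : (0:Int) < 1000), grp_shift]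
      exact h (i + 1) (by omega))
    omega

theorem chunksF_ne_nil (r : Int) (k : Nat) (h0 : 0 < r) (h1 : r < 1000 ^ (k + 1)) :
    chunksF r k ≠ [] := by
  intro hnil
  have := eq_zero_of_grps k r (by omega) h1 (chunksF_eq_nil r k hnil)
  omega

theorem join_one (c : String) : PySem.Str.join ", " [c] = c := by
  rw [← String.toList_inj]
  simp [PySem.Str.join, PySem.Chars.join_singleton]

theorem join_cons (c : String) (rest : List String) (h : rest ≠ []) :
    PySem.Str.join ", " (c :: rest) = c ++ ", " ++ PySem.Str.join ", " rest := by
  cases rest with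
  | nil => exact absurd rfl h
  | cons q t =>
    rw [← String.toList_inj]
    simp [PySem.Str.join, PySem.Chars.join_cons_cons]

theorem nnnB_small (m : Int) (h0 : 0 < m) (h1 : m < 100) : nnnB m = nnB m := by
  unfold nnnB
  have hrem : PySem.Int.floordiv m 100 = 0 := by
    rw [PySem.Int.floordiv_eq_ediv_of_pos (by omega : (0:Int) < 100)]
    exact Int.ediv_eq_zero_of_lt (by omega) h1
  have hmo : PySem.Int.mod m 100 = m := by
    rw [PySem.Int.mod_eq_emod_of_pos (by omega : (0:Int) < 100)]
    omega
  rw [hrem, hmo]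
  simp only [if_neg (by omega : ¬ (0:Int) > 0), if_pos (by omega : m > 0)]
  exact String.empty_append

theorem fold_chunks (val : Int) (hval : 0 ≤ val) (k : Nat) : ∀ acc : List String,
    (List.range (k + 1)).reverse.foldl
      (fun acc i => if (groupsB val).getD i 0 = 0 then acc
                    else acc ++ [chunkB i ((groupsB val).getD i 0)]) acc
      = acc ++ chunksF val k := by
  induction k with
  | zero =>
    intro acc
    have hr : (List.range (0 + 1)).reverse = [0] := by decide
    rw [hr, List.foldl_cons, List.foldl_nil]
    rw [groupsB_getD val hval 0, chunksF_zero_step]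
    rcases eq_or_ne (grp val 0) 0 with h | h
    · rw [if_pos h, if_pos h, List.append_nil]
    · rw [if_neg h, if_neg h]
  | succ j ih =>
    intro acc
    rw [List.range_succ, List.reverse_append]
    simp only [List.reverse_singleton, List.singleton_append, List.foldl_cons]
    rw [groupsB_getD val hval (j + 1), ih, chunksF_succ_step]
    rcases eq_or_ne (grp val (j + 1)) 0 with h | h
    · rw [if_pos h, if_pos h, List.nil_append]
    · rw [if_neg h, if_neg h, List.append_assoc]

theorem B_eq_F (k : Nat) : ∀ val : Int, 0 < val → val < 1000 ^ (k + 1) →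
    duch_number_alt val = PySem.Str.join ", " (chunksF val k) := by
  induction k with
  | zero =>
    intro val h0 h1
    norm_num at h1
    have hg : grp val 0 = val := grp_zero_eq_self val (by omega) (by omega)
    unfold duch_number_alt chunksF
    rw [hg, if_neg (by omega : ¬ val = 0), join_one]
    by_cases h2 : val < 100
    · rw [if_pos h2]
      unfold chunkB
      rw [if_pos rfl]
      exact (nnnB_small val h0 h2).symm
    · rw [if_neg h2, if_pos (by omega : val < 1000)]
      unfold chunkB
      rw [if_pos rfl]
  | succ j ih =>
    intro val h0 h1
    by_cases htop : grp val (j + 1) = 0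
    · have hlt : val < 1000 ^ (j + 1) := by
        rw [grp_eq] at htop
        have hq1 : val / 1000 ^ (j + 1) < 1000 := by
          rw [Int.ediv_lt_iff_lt_mul (pow1000_pos (j + 1)), ← pow_succ']
          exact h1
        have hq0 : (0:Int) ≤ val / 1000 ^ (j + 1) := Int.ediv_nonneg (by omega) (le_of_lt (pow1000_pos _))
        have hq : val / 1000 ^ (j + 1) = 0 := by omega
        have hdm := Int.ediv_add_emod val (1000 ^ (j + 1))
        have hem : val % 1000 ^ (j + 1) < 1000 ^ (j + 1) :=
          Int.emod_lt_of_pos val (pow1000_pos (j + 1))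
        rw [hq] at hdm
        omega
      rw [chunksF, htop, if_pos rfl, List.nil_append]
      exact ih val h0 hlt
    · have hge : 1000 ^ (j + 1) ≤ val := by
        rcases lt_or_ge val (1000 ^ (j + 1)) with hlt | hge
        case inr => exact hge
        case inl =>
          exfalso
          rw [grp_eq, Int.ediv_eq_zero_of_lt (by omega) hlt] at htop
          simp at htop
      have h1000 : (1000:Int) ≤ val :=
        le_trans (by calc (1000:Int) = 1000 ^ 1 := (pow_one 1000).symm
                        _ ≤ 1000 ^ (j + 1) := pow_le_pow_right₀ (by omega) (by omega)) hge
      have hlen : (groupsB val).length = j + 2 := by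
        have ha := groupsB_len_le (j + 2) val (by rw [pow_succ] at h1 ⊢; exact h1)
        have hb := groupsB_len_gt (j + 1) val hge
        omega
      unfold duch_number_alt
      rw [if_neg (by omega : ¬ val < 100), if_neg (by omega : ¬ val < 1000)]
      simp only [hlen]
      rw [fold_chunks val (by omega) (j + 1) []]
      rw [List.nil_append]

-- the joined chunks of val split into the top chunk and the chunks of the remainder
theorem F_split (j : Nat) (val : Int) (hlo : 1000 ^ (j + 1) ≤ val)
    (hhi : val < 1000 ^ (j + 2)) :
    PySem.Str.join ", " (chunksF val (j + 1)) =
      chunkB (j + 1) (val / 1000 ^ (j + 1)) ++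
        (if val % 1000 ^ (j + 1) > 0
         then ", " ++ PySem.Str.join ", " (chunksF (val % 1000 ^ (j + 1)) j) else "") := by
  have hl1 : 1 ≤ val / 1000 ^ (j + 1) := by
    rw [Int.le_ediv_iff_mul_le (pow1000_pos (j + 1))]
    omega
  have hl2 : val / 1000 ^ (j + 1) < 1000 := by
    rw [Int.ediv_lt_iff_lt_mul (pow1000_pos (j + 1)), ← pow_succ']
    exact hhi
  have hgtop : grp val (j + 1) = val / 1000 ^ (j + 1) := by
    rw [grp_eq]
    omega
  have hr0 : 0 ≤ val % 1000 ^ (j + 1) :=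
    Int.emod_nonneg val (ne_of_gt (pow1000_pos (j + 1)))
  have hrlt : val % 1000 ^ (j + 1) < 1000 ^ (j + 1) :=
    Int.emod_lt_of_pos val (pow1000_pos (j + 1))
  have hcongr : chunksF val j = chunksF (val % 1000 ^ (j + 1)) j :=
    (chunksF_congr _ _ j (fun i hi => grp_mod val (j + 1) i (by omega))).symm
  rw [chunksF, hgtop, if_neg (by omega : ¬ val / 1000 ^ (j + 1) = 0), List.singleton_append,
    hcongr]
  by_cases hr : val % 1000 ^ (j + 1) > 0
  · rw [if_pos hr, join_cons _ _ (chunksF_ne_nil _ j hr hrlt), String.append_assoc]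
  · have hz : val % 1000 ^ (j + 1) = 0 := by omega
    rw [if_neg hr, hz, chunksF_zero, join_one, String.append_empty]

theorem nn_eq (m : Int) (h1 : -20 ≤ m) (h2 : m < 100) (h3 : badNN m = false) : nnA m = nnB m := by
  by_cases h : m < 20
  · simp only [nnA, nnB, if_pos h]
  · have key : ∀ n : Nat, n < 100 →
        (20 ≤ n → badNN (n : Int) = false → nnA (n : Int) = nnB (n : Int)) := by decide
    have hm : m = ((m.toNat : Int)) := by omega
    rw [hm] at h3 ⊢
    exact key m.toNat (by omega) (by omega) h3

theorem nnn_eq (m : Int) (h1 : 0 ≤ m) (h2 : m < 1000)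
    (h3 : badNN (PySem.Int.mod m 100) = false) : nnnA m = nnnB m := by
  unfold nnnA nnnB
  have hlo : 0 ≤ PySem.Int.mod m 100 := PySem.Int.mod_nonneg m (by omega)
  have hhi : PySem.Int.mod m 100 < 100 := PySem.Int.mod_lt m (by omega)
  by_cases h : PySem.Int.mod m 100 > 0
  · simp only [if_pos h]
    rw [nn_eq _ (by omega) hhi h3]
  · simp only [if_neg h]

theorem loopA_miss (rec : Int → String) (val : Int) (v : Nat) (hv : v < 21)
    (h : ¬ (1000:Int) ^ v > val) : loopA rec val v = loopA rec val (v + 1) := by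
  rw [loopA, if_pos hv, if_neg h]

theorem loopA_hit (rec : Int → String) (val : Int) (k : Nat) (hv : k + 1 < 21)
    (h : (1000:Int) ^ (k + 1) > val) :
    loopA rec val (k + 1) =
      (let md : Int := (1000:Int) ^ k
       let l := PySem.Int.floordiv val md
       let r := val - l * md
       let ret := if l = 1 then "Eins" ++ (PySem.List.pyGet? denomDe (k : Int)).getD ""
                  else nnnA l ++ " " ++ (PySem.List.pyGet? denomDe (k : Int)).getD ""
       if r > 0 then ret ++ ", " ++ rec r else ret) := by
  rw [loopA, if_pos hv, if_pos h]
  simp only [Nat.add_sub_cancel]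

-- membership helper for Pre_'s group list
theorem mem_range4 (i : Nat) (h : i < 4) : i ∈ ([0, 1, 2, 3] : List Nat) := by
  interval_cases i <;> simp

theorem badNN_grp_of_pre (val : Int) (h0 : 0 ≤ val)
    (hpre : ∀ i ∈ ([0, 1, 2, 3] : List Nat), badNN (PySem.Int.mod (grp val i) 100) = false)
    (i : Nat) (hi : i < 4) : badNN (grp val i % 100) = false := by
  have := hpre i (mem_range4 i hi)
  rwa [PySem.Int.mod_eq_emod_of_pos (by omega : (0:Int) < 100)] at this

-- the inductive step for val ≥ 1000: the hit body of A's loop equals B's value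
theorem step_main (f : Nat) (val : Int) (k : Nat) (hk1 : 1 ≤ k) (hk4 : k < 4)
    (hlo : 1000 ^ k ≤ val) (hhi : val < 1000 ^ (k + 1)) (hf : val.toNat ≤ f)
    (hpre : ∀ i ∈ ([0, 1, 2, 3] : List Nat), badNN (PySem.Int.mod (grp val i) 100) = false)
    (ihf : ∀ r : Int, r.toNat < f → Pre_duch_number r → r ≤ 2147483648 →
      duchA f r = duch_number_alt r) :
    (let md : Int := (1000:Int) ^ k
     let l := PySem.Int.floordiv val md
     let r := val - l * md
     let ret := if l = 1 then "Eins" ++ (PySem.List.pyGet? denomDe (k : Int)).getD ""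
                else nnnA l ++ " " ++ (PySem.List.pyGet? denomDe (k : Int)).getD ""
     if r > 0 then ret ++ ", " ++ duchA f r else ret) = duch_number_alt val := by
  have hval0 : (0:Int) < val := lt_of_lt_of_le (pow1000_pos k) hlo
  obtain ⟨j, rfl⟩ : ∃ j, k = j + 1 := ⟨k - 1, by omega⟩
  have hfd : PySem.Int.floordiv val ((1000:Int) ^ (j + 1)) = val / 1000 ^ (j + 1) :=
    PySem.Int.floordiv_eq_ediv_of_pos (pow1000_pos (j + 1))
  have hrr : val - val / 1000 ^ (j + 1) * 1000 ^ (j + 1) = val % 1000 ^ (j + 1) := by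
    have h := Int.mul_ediv_add_emod val (1000 ^ (j + 1))
    have hcm : val / 1000 ^ (j + 1) * 1000 ^ (j + 1) = 1000 ^ (j + 1) * (val / 1000 ^ (j + 1)) :=
      mul_comm _ _
    omega
  have hl1 : 1 ≤ val / 1000 ^ (j + 1) := by
    rw [Int.le_ediv_iff_mul_le (pow1000_pos (j + 1))]
    omega
  have hl2 : val / 1000 ^ (j + 1) < 1000 := by
    rw [Int.ediv_lt_iff_lt_mul (pow1000_pos (j + 1)), ← pow_succ']
    exact hhi
  have hgtop : grp val (j + 1) = val / 1000 ^ (j + 1) := by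
    rw [grp_eq]; omega
  have hr0 : 0 ≤ val % 1000 ^ (j + 1) :=
    Int.emod_nonneg val (ne_of_gt (pow1000_pos (j + 1)))
  have hrlt : val % 1000 ^ (j + 1) < 1000 ^ (j + 1) :=
    Int.emod_lt_of_pos val (pow1000_pos (j + 1))
  -- the chunk texts agree (A's via nnnA, B's via nnnB)
  have hchunk : (if val / 1000 ^ (j + 1) = 1
        then "Eins" ++ (PySem.List.pyGet? denomDe ((j + 1 : Nat) : Int)).getD ""
        else nnnA (val / 1000 ^ (j + 1)) ++ " " ++
          (PySem.List.pyGet? denomDe ((j + 1 : Nat) : Int)).getD "")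
      = chunkB (j + 1) (val / 1000 ^ (j + 1)) := by
    unfold chunkB
    rw [if_neg (by omega : ¬ j + 1 = 0)]
    by_cases h1 : val / 1000 ^ (j + 1) = 1
    · rw [if_pos h1, if_pos h1]
    · rw [if_neg h1, if_neg h1]
      have hbad : badNN (PySem.Int.mod (val / 1000 ^ (j + 1)) 100) = false := by
        rw [PySem.Int.mod_eq_emod_of_pos (by omega : (0:Int) < 100)]
        have := badNN_grp_of_pre val (by omega) hpre (j + 1) (by omega)
        rwa [hgtop] at this
      rw [nnn_eq _ (by omega) (by omega) hbad]
  rw [B_eq_F (j + 1) val hval0 hhi, F_split j val hlo hhi]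
  simp only [hfd, hrr, hchunk]
  by_cases hr : val % 1000 ^ (j + 1) > 0
  · rw [if_pos hr, if_pos hr]
    have hub : (1000:Int) ^ (j + 1) ≤ 1000 ^ 3 := pow_le_pow_right₀ (by omega) (by omega)
    have hrB : duchA f (val % 1000 ^ (j + 1)) = duch_number_alt (val % 1000 ^ (j + 1)) := by
      apply ihf
      · -- r < val since val - r = l * 1000^(j+1) ≥ 1000^(j+1) ≥ 1000
        have hdm := Int.mul_ediv_add_emod val (1000 ^ (j + 1))
        have hstep : 1000 ^ (j + 1) * (val / 1000 ^ (j + 1)) ≥ 1000 ^ (j + 1) := by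
          nlinarith [pow1000_pos (j + 1), hl1]
        have hp : (1000:Int) ≤ 1000 ^ (j + 1) :=
          le_trans (by norm_num) (pow_le_pow_right₀ (by omega) (by omega : 1 ≤ j + 1))
        have hcm : val / 1000 ^ (j + 1) * 1000 ^ (j + 1) = 1000 ^ (j + 1) * (val / 1000 ^ (j + 1)) :=
          mul_comm _ _
        omega
      · refine ⟨by omega, fun h0 i hi => ?_⟩
        have hi4 : i < 4 := by
          simp only [List.mem_cons, List.not_mem_nil, or_false] at hi
          omega
        by_cases hij : i < j + 1
        · rw [grp_mod val (j + 1) i hij]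
          exact hpre i (mem_range4 i hi4)
        · have hsm : grp (val % 1000 ^ (j + 1)) i = 0 := by
            apply grp_small _ _ hr0
            calc val % 1000 ^ (j + 1) < 1000 ^ (j + 1) := hrlt
              _ ≤ 1000 ^ i := pow_le_pow_right₀ (by omega) (by omega)
          rw [hsm]
          decide
      · have : (1000:Int) ^ 3 = 1000000000 := by norm_num
        omega
    rw [hrB, B_eq_F j (val % 1000 ^ (j + 1)) hr hrlt]
    rw [String.append_assoc]
  · rw [if_neg hr, if_neg hr, String.append_empty]

theorem mainA (f : Nat) : ∀ val : Int, val.toNat < f → Pre_duch_number val →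
    val ≤ 2147483648 → duchA f val = duch_number_alt val := by
  induction f with
  | zero => intro val h; exact absurd h (Nat.not_lt_zero _)
  | succ f ih =>
    intro val hf hpre hdom
    obtain ⟨hpre1, hpre2⟩ := hpre
    rw [duchA]
    by_cases h1 : val < 100
    · rw [if_pos h1]
      unfold duch_number_alt
      rw [if_pos h1]
      apply nn_eq val hpre1 h1
      by_cases h0 : (0:Int) ≤ val
      · have hb := badNN_grp_of_pre val h0 (hpre2 h0) 0 (by omega)
        rw [grp_zero_eq_self val h0 (by omega)] at hb
        have hm : val % 100 = val := by omega
        rwa [hm] at hb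
      · simp only [badNN]
        simp only [Bool.or_eq_false_iff, Bool.and_eq_false_iff, decide_eq_false_iff_not]
        omega
    · by_cases h2 : val < 1000
      · rw [if_neg h1, if_pos h2]
        unfold duch_number_alt
        rw [if_neg h1, if_pos h2]
        apply nnn_eq val (by omega) h2
        have hb := badNN_grp_of_pre val (by omega) (hpre2 (by omega)) 0 (by omega)
        rw [grp_zero_eq_self val (by omega) h2] at hb
        rwa [PySem.Int.mod_eq_emod_of_pos (by omega : (0:Int) < 100)]
      · rw [if_neg h1, if_neg h2]
        have hpre2' := hpre2 (by omega)
        have hstep : ∀ k : Nat, 1 ≤ k → k < 4 → 1000 ^ k ≤ val → val < 1000 ^ (k + 1) →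
            loopA (duchA f) val 0 = duch_number_alt val := by
          intro k hk1 hk4 hlo hhi
          have hmiss : ∀ v : Nat, v ≤ k + 1 → loopA (duchA f) val 0 = loopA (duchA f) val v := by
            intro v hv
            induction v with
            | zero => rfl
            | succ w ihw =>
              have hle : (1000:Int) ^ w ≤ val :=
                le_trans (pow_le_pow_right₀ (by omega) (by omega : w ≤ k)) hlo
              rw [ihw (by omega), loopA_miss _ _ w (by omega) (not_lt.mpr hle)]
          rw [hmiss (k + 1) (le_refl _), loopA_hit _ _ k (by omega) hhi]
          exact step_main f val k hk1 hk4 hlo hhi (by omega) hpre2'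
            (fun r hr hpr hdr => ih r hr hpr hdr)
        by_cases hk1 : val < 1000 ^ 2
        · exact hstep 1 (by omega) (by omega) (by norm_num; omega) hk1
        · by_cases hk2 : val < 1000 ^ 3
          · exact hstep 2 (by omega) (by omega) (by omega) hk2
          · have hk3 : val < 1000 ^ 4 := by
              have : (1000:Int) ^ 4 = 1000000000000 := by norm_num
              omega
            exact hstep 3 (by omega) (by omega) (by omega) hk3

-- ===== VERDICT (by name: the statement is the Claim_ definition above) =====
theorem duch_number_spec : Claim_equal_duch_number := by
  intro val hdom hpre
  unfold Spec_duch_number duch_number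
  have hd : val ≤ 2147483648 := by
    have h := hdom
    unfold Dom_duch_number pvDomInt at h
    have h2 := of_decide_eq_true h
    omega
  exact mainA (val.toNat + 1) val (by omega) hpre hd
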